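-- pv_equiv track=rewrite | github.com/spazzylemons/brute-engine | tools/menu_generator.py | stringtoken
-- ===== SOURCE A (Python) =====
-- def stringtoken(value: str) -> str:
--     result = '"'
--     for byte in value.encode():
--         # Convert non-ASCII, '"', and '\' to hex escape.
--         if 0x20 <= byte <= 0x7e and byte != ord('"') and byte != ord('\\'):
--             result += chr(byte)
--         else:
--             result += '\\x{:02x}'.format(byte)
--     result += '"'
--     return result
-- ===== SOURCE B (Python) =====
-- def stringtoken(value: str) -> str:
--     data = value.encode()
--     n = len(data)
--     parts = ['"']
--     i = 0
--     while i < n: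
--         j = i
--         while j < n and 0x20 <= data[j] <= 0x7e and data[j] != 0x22 and data[j] != 0x5c:
--             j += 1
--         parts.append(data[i:j].decode('ascii'))
--         if j < n:
--             parts.append('\\x{:02x}'.format(data[j]))
--             j += 1
--         i = j
--     parts.append('"')
--     return ''.join(parts)
-- ===== Notes on version B (the rewrite author's own statement) =====
-- stated objective: alternative
-- what changed: Replaces A's per-byte conditional append with a run-based two-level scan: an inner loop finds each maximal run of safe printable bytes, which is sliced out and decoded wholesale, then the single offending byte at the run boundary is hex-escaped; the collected parts are joined once at the end.
import Mathlib
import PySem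

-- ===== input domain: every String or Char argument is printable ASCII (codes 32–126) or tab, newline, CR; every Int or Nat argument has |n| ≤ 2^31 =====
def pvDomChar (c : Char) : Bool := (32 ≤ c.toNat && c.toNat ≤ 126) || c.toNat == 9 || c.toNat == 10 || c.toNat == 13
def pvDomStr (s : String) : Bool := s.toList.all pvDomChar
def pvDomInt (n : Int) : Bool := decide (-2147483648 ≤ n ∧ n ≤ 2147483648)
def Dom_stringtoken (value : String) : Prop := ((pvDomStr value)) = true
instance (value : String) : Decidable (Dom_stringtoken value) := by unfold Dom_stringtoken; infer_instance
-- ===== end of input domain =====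

-- B replaces A's per-byte conditional append by a run-based two-level scan:
-- copy each maximal safe run wholesale, hex-escape the byte at its boundary,
-- join the parts once (objective: alternative; same output).

-- '{:x}' digit for a value 0..15 (lowercase)
def hexDigit (n : Nat) : Char :=
  if n < 10 then Char.ofNat (48 + n) else Char.ofNat (87 + n)

-- '\\x{:02x}'.format(b) for a byte b (< 256), as a list of chars
def hexEscape (b : Nat) : List Char :=
  ['\\', 'x', hexDigit (b / 16), hexDigit (b % 16)]

-- ===== PORT A =====
-- value.encode(): on the ASCII domain each char is one byte equal to its codepoint
def stringtoken (value : String) : String :=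
  let result : List Char :=
    (value.toList.map Char.toNat).foldl (fun result byte =>
      if 32 ≤ byte ∧ byte ≤ 126 ∧ byte ≠ 34 ∧ byte ≠ 92 then
        result ++ [Char.ofNat byte]
      else
        result ++ hexEscape byte) ['"']
  String.ofList (result ++ ['"'])

-- ===== PORT B =====
-- the inner while loop's safe-byte test
def safeByte (b : Nat) : Bool :=
  32 ≤ b && b ≤ 126 && b != 34 && b != 92

-- the outer while loop: take the maximal safe run (inner while = takeWhile),
-- decode it wholesale, escape the one boundary byte, continue past it
def emitRuns (bs : List Nat) : List Char :=
  let run := bs.takeWhile safeByte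
  let tail := bs.dropWhile safeByte
  run.map Char.ofNat ++
    (if tail.isEmpty then []
     else hexEscape (tail.headD 0) ++ emitRuns (tail.drop 1))
termination_by bs.length
decreasing_by
  rename_i htl
  have hle := List.length_dropWhile_le (p := safeByte) (l := bs)
  have hpos : 0 < (List.dropWhile safeByte bs).length := by
    simp only [List.isEmpty_iff] at htl
    exact List.length_pos_iff.mpr htl
  simp only [List.length_drop]
  omega

def stringtoken_alt (value : String) : String :=
  String.ofList ('"' :: emitRuns (value.toList.map Char.toNat) ++ ['"'])

-- ===== PRECONDITION & SPEC =====
def Spec_stringtoken (value : String) (out : String) : Prop := out = stringtoken_alt value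
instance (value : String) (out : String) : Decidable (Spec_stringtoken value out) := by unfold Spec_stringtoken; infer_instance

-- ===== CLAIM (what is proved, stated in full; the proofs are below) =====
def Claim_equal_stringtoken : Prop := ∀ (value : String), Dom_stringtoken value → Spec_stringtoken value (stringtoken value)

-- ===== LEMMAS AND PROOFS =====

-- the per-byte rendering both programs realise
def escByte (b : Nat) : List Char :=
  if 32 ≤ b ∧ b ≤ 126 ∧ b ≠ 34 ∧ b ≠ 92 then [Char.ofNat b] else hexEscape b

theorem escByte_safe (b : Nat) (h : safeByte b = true) : escByte b = [Char.ofNat b] := by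
  unfold escByte
  simp only [safeByte, Bool.and_eq_true, decide_eq_true_eq, bne_iff_ne] at h
  rw [if_pos ⟨h.1.1.1, h.1.1.2, h.1.2, h.2⟩]

theorem escByte_unsafe (b : Nat) (h : safeByte b = false) : escByte b = hexEscape b := by
  unfold escByte
  simp only [safeByte, Bool.and_eq_false_iff, decide_eq_false_iff_not, bne_eq_false_iff_eq,
    not_le] at h
  rw [if_neg]
  rintro ⟨h1, h2, h3, h4⟩
  rcases h with ((h | h) | h) | h <;> omega

theorem emitRuns_nil : emitRuns [] = [] := by
  rw [emitRuns.eq_1]; rfl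

theorem emitRuns_cons_safe (b : Nat) (rest : List Nat) (h : safeByte b = true) :
    emitRuns (b :: rest) = Char.ofNat b :: emitRuns rest := by
  conv_lhs => rw [emitRuns.eq_1]
  conv_rhs => rw [emitRuns.eq_1]
  simp only [List.takeWhile_cons, List.dropWhile_cons, h, if_true, List.map_cons,
    List.cons_append]

theorem emitRuns_cons_unsafe (b : Nat) (rest : List Nat) (h : safeByte b = false) :
    emitRuns (b :: rest) = hexEscape b ++ emitRuns rest := by
  conv_lhs => rw [emitRuns.eq_1]
  simp only [List.takeWhile_cons, List.dropWhile_cons, h, Bool.false_eq_true, if_false,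
    List.map_nil, List.nil_append, List.isEmpty_cons, List.headD_cons, List.drop_succ_cons,
    List.drop_zero]

-- B's run-based recursion produces the per-byte flatMap
theorem emitRuns_eq_flatMap (bs : List Nat) : emitRuns bs = bs.flatMap escByte := by
  induction bs with
  | nil => rw [emitRuns_nil, List.flatMap_nil]
  | cons b rest ih =>
    by_cases h : safeByte b = true
    · rw [emitRuns_cons_safe b rest h, List.flatMap_cons, escByte_safe b h, ih]
      rfl
    · rw [Bool.not_eq_true] at h
      rw [emitRuns_cons_unsafe b rest h, List.flatMap_cons, escByte_unsafe b h, ih]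

-- A's foldl produces the same flatMap
theorem stringtoken_eq_flatMap (value : String) :
    stringtoken value =
      String.ofList ('"' :: (value.toList.map Char.toNat).flatMap escByte ++ ['"']) := by
  unfold stringtoken
  have hfun : (fun (result : List Char) (byte : Nat) =>
      if 32 ≤ byte ∧ byte ≤ 126 ∧ byte ≠ 34 ∧ byte ≠ 92 then
        result ++ [Char.ofNat byte]
      else
        result ++ hexEscape byte) = (fun result byte => result ++ escByte byte) := by
    funext r b
    unfold escByte
    split <;> rfl
  rw [hfun, PySem.List.foldl_append_eq_flatMap]
  rfl

theorem stringtoken_spec : Claim_equal_stringtoken := by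
  intro value _
  unfold Spec_stringtoken stringtoken_alt
  rw [stringtoken_eq_flatMap, emitRuns_eq_flatMap]
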